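-- pv_equiv track=rewrite | github.com/chiraagsharma24/CS-367---Lab-Report | Week 3/Week3.2.py | flip_neighbors
-- ===== SOURCE A (Python) =====
-- def flip_neighbors(sol, flip=1):
--     n = len(sol)
--     nbrs = []
--     if flip==1:
--         for i in range(n):
--             nb = sol[:]
--             nb[i] = not nb[i]
--             nbrs.append(nb)
--     elif flip==2:
--         for i in range(n):
--             for j in range(i+1, n):
--                 nb = sol[:]
--                 nb[i] = not nb[i]
--                 nb[j] = not nb[j]
--                 nbrs.append(nb)
--     elif flip==3:
--         for i in range(n):
--             for j in range(i+1, n):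
--                 for k in range(j+1, n):
--                     nb = sol[:]
--                     nb[i] = not nb[i]
--                     nb[j] = not nb[j]
--                     nb[k] = not nb[k]
--                     nbrs.append(nb)
--     return nbrs
-- ===== SOURCE B (Python) =====
-- def flip_neighbors(sol, flip=1):
--     # One generic pass: recursively build the index combinations, then flip each set.
--     if flip not in (1, 2, 3):
--         return []
--     n = len(sol)
--
--     def combos(start, k):
--         if k == 0:
--             return [[]]
--         return [[i] + rest for i in range(start, n) for rest in combos(i + 1, k - 1)]
--
--     out = []
--     for idxs in combos(0, flip):
--         nb = sol[:]
--         for i in idxs: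
--             nb[i] = not nb[i]
--         out.append(nb)
--     return out
-- ===== Notes on version B (the rewrite author's own statement) =====
-- stated objective: simpler
-- what changed: Replaces the three hard-coded nested-loop branches with one generic recursive index-combination generator plus a single flipping loop, covering flip=1/2/3 uniformly.
import Mathlib
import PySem

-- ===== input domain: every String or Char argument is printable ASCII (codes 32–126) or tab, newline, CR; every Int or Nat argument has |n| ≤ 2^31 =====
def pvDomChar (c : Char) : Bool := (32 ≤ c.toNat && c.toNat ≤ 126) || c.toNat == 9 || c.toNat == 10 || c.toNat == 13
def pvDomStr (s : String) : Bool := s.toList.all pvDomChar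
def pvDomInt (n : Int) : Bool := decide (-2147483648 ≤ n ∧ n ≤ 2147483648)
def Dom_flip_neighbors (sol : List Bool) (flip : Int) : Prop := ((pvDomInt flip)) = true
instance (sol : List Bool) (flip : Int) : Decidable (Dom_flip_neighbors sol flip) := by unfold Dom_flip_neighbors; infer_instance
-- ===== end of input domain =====

-- B replaces A's three hard-coded nested-loop branches by one generic recursive
-- index-combination generator plus a single flipping loop (objective: simpler).

-- ===== PORT A =====
-- 'nb[i] = not nb[i]': every index used is a loop index with 0 ≤ i < len nb, where
-- List.set / getD are exact for Python's item read+assignment.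
def pyFlip (xs : List Bool) (i : Nat) : List Bool := xs.set i (!(xs.getD i false))

-- range(n) → List.range n; range(a, n) with 0 ≤ a → List.range' a (n - a): exact.
def flip_neighbors (sol : List Bool) (flip : Int) : List (List Bool) :=
  let n := sol.length
  let nbrs : List (List Bool) := []
  if flip = 1 then
    (List.range n).foldl (fun nbrs i => nbrs ++ [pyFlip sol i]) nbrs
  else if flip = 2 then
    (List.range n).foldl (fun nbrs i =>
      (List.range' (i+1) (n - (i+1))).foldl (fun nbrs j =>
        nbrs ++ [pyFlip (pyFlip sol i) j]) nbrs) nbrs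
  else if flip = 3 then
    (List.range n).foldl (fun nbrs i =>
      (List.range' (i+1) (n - (i+1))).foldl (fun nbrs j =>
        (List.range' (j+1) (n - (j+1))).foldl (fun nbrs k =>
          nbrs ++ [pyFlip (pyFlip (pyFlip sol i) j) k]) nbrs) nbrs) nbrs
  else nbrs

-- ===== PORT B =====
-- B's recursive combination generator over index ranges; range(start, n) → List.range' start (n - start).
def combosB (n : Nat) (start : Nat) (k : Nat) : List (List Nat) :=
  match k with
  | 0 => [[]]
  | Nat.succ k' =>
      (List.range' start (n - start)).flatMap
        (fun i => (combosB n (i+1) k').map (fun rest => i :: rest))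

def flip_neighbors_alt (sol : List Bool) (flip : Int) : List (List Bool) :=
  if flip = 1 ∨ flip = 2 ∨ flip = 3 then
    (combosB sol.length 0 flip.toNat).map (fun idxs => idxs.foldl pyFlip sol)
  else []

-- ===== PRECONDITION & SPEC =====
def Spec_flip_neighbors (sol : List Bool) (flip : Int) (out : List (List Bool)) : Prop := out = flip_neighbors_alt sol flip
instance (sol : List Bool) (flip : Int) (out : List (List Bool)) : Decidable (Spec_flip_neighbors sol flip out) := by unfold Spec_flip_neighbors; infer_instance

-- ===== CLAIM (what is proved, stated in full; the proofs are below) =====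
def Claim_equal_flip_neighbors : Prop := ∀ (sol : List Bool) (flip : Int), Dom_flip_neighbors sol flip → Spec_flip_neighbors sol flip (flip_neighbors sol flip)

-- ===== LEMMAS AND PROOFS =====

theorem flatMap_single {α β : Type} (l : List α) (f : α → β) :
    l.flatMap (fun x => [f x]) = l.map f := by
  induction l with
  | nil => rfl
  | cons x xs ih => simp [List.flatMap_cons, ih]

theorem combosB_zero (n s : Nat) : combosB n s 0 = [[]] := rfl

theorem combosB_succ (n s k : Nat) :
    combosB n s (k+1) = (List.range' s (n - s)).flatMap
      (fun i => (combosB n (i+1) k).map (fun rest => i :: rest)) := rfl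

theorem combosB_one (n s : Nat) :
    combosB n s 1 = (List.range' s (n - s)).map (fun i => [i]) := by
  show (List.range' s (n - s)).flatMap (fun i => (combosB n (i+1) 0).map (fun rest => i :: rest))
      = _
  simp [combosB_zero, flatMap_single]

-- ===== VERDICT (by name: the statement is the Claim_ definition above) =====
theorem flip_neighbors_spec : Claim_equal_flip_neighbors := by
  intro sol flip _
  unfold Spec_flip_neighbors flip_neighbors flip_neighbors_alt
  by_cases h1 : flip = 1
  · subst h1
    simp [combosB_one, List.range_eq_range', List.map_map, Function.comp_def,
      List.foldl, ← List.flatMap_def, flatMap_single]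
  · by_cases h2 : flip = 2
    · subst h2
      simp [combosB_succ, combosB_zero, List.range_eq_range', List.map_map, Function.comp_def,
        List.foldl, ← List.flatMap_def, flatMap_single, List.map_flatMap]
    · by_cases h3 : flip = 3
      · subst h3
        simp [combosB_succ, combosB_zero, List.range_eq_range', List.map_map, Function.comp_def,
        List.foldl, ← List.flatMap_def, flatMap_single, List.map_flatMap]
      · simp [h1, h2, h3]
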